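-- pv_equiv track=rewrite | github.com/Tehlikeli107/cr-universal | cr_label_kmin_extended.py | induced_sub_canonical_node_edge
-- ===== SOURCE A (Python) =====
-- from itertools import combinations, permutations
--
-- def canonical_labeled_graph_node_edge(n, node_labels, edge_labels):
--     """
--     Canonical form with both node and edge labels.
--     node_labels: dict {node_id: label (int)}
--     edge_labels: dict {(i,j): color (int)} for i<j
--     """
--     def make_adj(perm):
--         mat = []
--         for i in range(n):
--             row = []
--             for j in range(n):
--                 if i == j:
--                     row.append(node_labels.get(perm[i], 1))
--                 else:
--                     pi, pj = perm[i], perm[j]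
--                     key = (min(pi,pj), max(pi,pj))
--                     row.append(edge_labels.get(key, 0))
--             mat.append(tuple(row))
--         return tuple(mat)
--
--     best = None
--     for perm in permutations(range(n)):
--         adj = make_adj(perm)
--         if best is None or adj < best:
--             best = adj
--     return best
--
-- def induced_sub_canonical_node_edge(n_global, node_labels, edge_labels, subset):
--     """Canonical form of induced k-subgraph."""
--     k = len(subset)
--     sl = sorted(subset)
--     sub_node = {i: node_labels.get(sl[i], 1) for i in range(k)}
--     sub_edge = {}
--     for i in range(k):
--         for j in range(i+1, k):
--             key = (min(sl[i], sl[j]), max(sl[i], sl[j]))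
--             c = edge_labels.get(key, 0)
--             if c > 0:
--                 sub_edge[(i, j)] = c
--     return canonical_labeled_graph_node_edge(k, sub_node, sub_edge)
-- ===== SOURCE B (Python) =====
-- def induced_sub_canonical_node_edge(n_global, node_labels, edge_labels, subset):
--     """Canonical form of induced k-subgraph, by backtracking search with
--     first-cell pruning over precomputed label/color tables (no itertools,
--     no per-cell dict lookups inside the permutation loop)."""
--     k = len(subset)
--     sl = sorted(subset)
--     lab = [node_labels.get(v, 1) for v in sl]
--
--     def colval(u, v):
--         c = edge_labels.get((min(u, v), max(u, v)), 0)
--         return c if c > 0 else 0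
--
--     col = [[colval(u, v) for v in sl] for u in sl]
--
--     best = None
--
--     def build(perm):
--         return tuple(
--             tuple(lab[perm[i]] if i == j else col[perm[i]][perm[j]]
--                   for j in range(k))
--             for i in range(k))
--
--     def dfs(perm, rest):
--         nonlocal best
--         if not rest:
--             adj = build(perm)
--             if best is None or adj < best:
--                 best = adj
--             return
--         if best is not None and perm and lab[perm[0]] > best[0][0]:
--             return
--         for i in range(len(rest)):
--             dfs(perm + [rest[i]], rest[:i] + rest[i + 1:])
--
--     dfs([], list(range(k)))
--     return best
-- ===== Notes on version B (the rewrite author's own statement) =====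
-- stated objective: alternative
-- what changed: Replaced the enumerate-all-permutations-of-range(k) loop (itertools + per-cell dict lookups with min/max keys) by a recursive backtracking search over partial permutations that precomputes the node-label list and a symmetric k x k color table once and prunes a whole branch as soon as the first matrix cell of every completion already exceeds the incumbent best's first cell.
import Mathlib
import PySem

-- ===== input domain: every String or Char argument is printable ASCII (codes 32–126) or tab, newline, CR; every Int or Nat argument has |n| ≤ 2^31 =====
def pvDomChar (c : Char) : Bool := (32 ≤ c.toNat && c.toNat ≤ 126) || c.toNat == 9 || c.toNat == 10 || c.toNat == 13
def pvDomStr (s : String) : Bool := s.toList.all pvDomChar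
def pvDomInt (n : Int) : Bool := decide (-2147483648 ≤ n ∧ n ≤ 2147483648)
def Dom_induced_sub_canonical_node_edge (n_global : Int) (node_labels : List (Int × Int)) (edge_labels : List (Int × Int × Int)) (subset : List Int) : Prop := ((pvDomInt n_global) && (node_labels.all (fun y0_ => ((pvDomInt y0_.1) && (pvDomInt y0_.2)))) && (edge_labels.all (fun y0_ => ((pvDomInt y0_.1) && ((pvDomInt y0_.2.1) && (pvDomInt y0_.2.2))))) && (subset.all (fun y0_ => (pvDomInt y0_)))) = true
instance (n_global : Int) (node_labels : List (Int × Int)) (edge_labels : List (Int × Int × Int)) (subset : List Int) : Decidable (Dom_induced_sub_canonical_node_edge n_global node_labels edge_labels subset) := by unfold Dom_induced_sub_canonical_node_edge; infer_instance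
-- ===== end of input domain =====

-- B replaces A's enumerate-all-permutations scan with a backtracking search over partial
-- permutations that prunes on the first matrix cell and precomputes the label/color tables
-- (objective: alternative — no materialised permutation list, no dict/min/max lookups per cell).

-- ===== PORT A =====
-- Python tuple '<' (lexicographic) on rows of ints and on matrices, as used by 'adj < best'.
def pyLtRow : List Int → List Int → Bool
  | _, [] => false
  | [], _ :: _ => true
  | a :: as, b :: bs => if a < b then true else if a = b then pyLtRow as bs else false

def pyLtMat : List (List Int) → List (List Int) → Bool
  | _, [] => false
  | [], _ :: _ => true
  | r :: rs, s :: ss => if pyLtRow r s then true else if r = s then pyLtMat rs ss else false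

-- make_adj: positions are Python ints 0..n-1, represented as Nat; perm[i] is always in range,
-- so the total 'getD … 0' is exact here.
def makeAdj (n : Nat) (nodeL : PySem.Dict Nat Int) (edgeL : PySem.Dict (Nat × Nat) Int) (perm : List Nat) : List (List Int) :=
  (List.range n).map (fun i => (List.range n).map (fun j =>
    if i = j then nodeL.getD (perm.getD i 0) 1
    else
      let pi := perm.getD i 0
      let pj := perm.getD j 0
      edgeL.getD (min pi pj, max pi pj) 0))

-- 'best' starts as None; permutations(range n) is never empty, so the final '.getD []' only
-- converts the (unreachable) None to the result type.
def canonical_labeled_graph_node_edge (n : Nat) (nodeL : PySem.Dict Nat Int) (edgeL : PySem.Dict (Nat × Nat) Int) : List (List Int) :=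
  ((PySem.List.permutations (List.range n) n).foldl
    (fun best perm =>
      let adj := makeAdj n nodeL edgeL perm
      match best with
      | none => some adj
      | some b => if pyLtMat adj b then some adj else some b) none).getD []

def induced_sub_canonical_node_edge (n_global : Int) (node_labels : List (Int × Int)) (edge_labels : List (Int × Int × Int)) (subset : List Int) : List (List Int) :=
  let k := subset.length
  let sl := PySem.List.sorted subset (fun x => x) false
  let nd : PySem.Dict Int Int := PySem.Dict.ofList node_labels
  let ed : PySem.Dict (Int × Int) Int := PySem.Dict.ofList (edge_labels.map (fun t => ((t.1, t.2.1), t.2.2)))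
  let sub_node : PySem.Dict Nat Int :=
    (List.range k).foldl (fun d i => d.insert i (nd.getD (sl.getD i 0) 1)) PySem.Dict.empty
  -- range(i+1, k) over Nats is List.range' (i+1) (k-(i+1)) (exact: both ends are nonnegative)
  let sub_edge : PySem.Dict (Nat × Nat) Int :=
    (List.range k).foldl (fun d i =>
      (List.range' (i+1) (k - (i+1))).foldl (fun d j =>
        let c := ed.getD (min (sl.getD i 0) (sl.getD j 0), max (sl.getD i 0) (sl.getD j 0)) 0
        if 0 < c then d.insert (i, j) c else d) d) PySem.Dict.empty
  canonical_labeled_graph_node_edge k sub_node sub_edge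

-- ===== PORT B =====
def colval (ed : PySem.Dict (Int × Int) Int) (u v : Int) : Int :=
  let c := ed.getD (min u v, max u v) 0
  if 0 < c then c else 0

-- build(perm): indices are always in range, so the total 'getD' is exact.
def buildMat (k : Nat) (lab : List Int) (col : List (List Int)) (perm : List Nat) : List (List Int) :=
  (List.range k).map (fun i => (List.range k).map (fun j =>
    if i = j then lab.getD (perm.getD i 0) 0
    else (col.getD (perm.getD i 0) []).getD (perm.getD j 0) 0))

-- dfs(perm, rest); the fuel argument r is always rest.length (the obvious termination measure),
-- so 'r = 0' is exactly Python's 'if not rest'.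
def dfsGo (lab : List Int) (col : List (List Int)) (k : Nat) :
    Nat → List Nat → List Nat → Option (List (List Int)) → Option (List (List Int))
  | 0, perm, _, best =>
      let adj := buildMat k lab col perm
      match best with
      | none => some adj
      | some b => if pyLtMat adj b then some adj else some b
  | r+1, perm, rest, best =>
      if (match best, perm with
          | some b, p0 :: _ => decide ((b.getD 0 []).getD 0 0 < lab.getD p0 0)
          | _, _ => false) then best
      else
        (List.range rest.length).foldl
          (fun acc i => dfsGo lab col k r (perm ++ [rest.getD i 0]) (rest.eraseIdx i) acc) best

def induced_sub_canonical_node_edge_alt (n_global : Int) (node_labels : List (Int × Int)) (edge_labels : List (Int × Int × Int)) (subset : List Int) : List (List Int) :=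
  let k := subset.length
  let sl := PySem.List.sorted subset (fun x => x) false
  let nd : PySem.Dict Int Int := PySem.Dict.ofList node_labels
  let ed : PySem.Dict (Int × Int) Int := PySem.Dict.ofList (edge_labels.map (fun t => ((t.1, t.2.1), t.2.2)))
  let lab := sl.map (fun v => nd.getD v 1)
  let col := sl.map (fun u => sl.map (fun v => colval ed u v))
  (dfsGo lab col k k [] (List.range k) none).getD []

-- ===== PRECONDITION & SPEC =====
def Spec_induced_sub_canonical_node_edge (n_global : Int) (node_labels : List (Int × Int)) (edge_labels : List (Int × Int × Int)) (subset : List Int) (out : List (List Int)) : Prop := out = induced_sub_canonical_node_edge_alt n_global node_labels edge_labels subset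
instance (n_global : Int) (node_labels : List (Int × Int)) (edge_labels : List (Int × Int × Int)) (subset : List Int) (out : List (List Int)) : Decidable (Spec_induced_sub_canonical_node_edge n_global node_labels edge_labels subset out) := by unfold Spec_induced_sub_canonical_node_edge; infer_instance

-- ===== CLAIM (what is proved, stated in full; the proofs are below) =====
def Claim_equal_induced_sub_canonical_node_edge : Prop := ∀ (n_global : Int) (node_labels : List (Int × Int)) (edge_labels : List (Int × Int × Int)) (subset : List Int), Dom_induced_sub_canonical_node_edge n_global node_labels edge_labels subset → Spec_induced_sub_canonical_node_edge n_global node_labels edge_labels subset (induced_sub_canonical_node_edge n_global node_labels edge_labels subset)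

-- ===== LEMMAS AND PROOFS =====

def upd (k : Nat) (lab : List Int) (col : List (List Int)) (best : Option (List (List Int))) (p : List Nat) : Option (List (List Int)) :=
  match best with
  | none => some (buildMat k lab col p)
  | some b => if pyLtMat (buildMat k lab col p) b then some (buildMat k lab col p) else some b
def BestInv (k : Nat) (lab : List Int) (col : List (List Int)) (best : Option (List (List Int))) : Prop :=
  ∀ b, best = some b → ∃ q, b = buildMat k lab col q

theorem foldl_fixed {α β : Type} (f : β → α → β) (c : β) (l : List α) (h : ∀ x ∈ l, f c x = c) : l.foldl f c = c := by
  induction l with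
  | nil => rfl
  | cons x t ih => simp only [List.foldl_cons, h x (by simp)]; exact ih (fun y hy => h y (by simp [hy]))

theorem upd_none (k : Nat) (lab : List Int) (col : List (List Int)) (p : List Nat) :
    upd k lab col none p = some (buildMat k lab col p) := rfl

theorem upd_some (k : Nat) (lab : List Int) (col : List (List Int)) (b : List (List Int)) (p : List Nat) :
    upd k lab col (some b) p = if pyLtMat (buildMat k lab col p) b then some (buildMat k lab col p) else some b := rfl

theorem bestInv_upd (k : Nat) (lab : List Int) (col : List (List Int)) (best : Option (List (List Int))) (p : List Nat)
    (h : BestInv k lab col best) : BestInv k lab col (upd k lab col best p) := by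
  intro b hb
  cases best with
  | none => exact ⟨p, by simpa [upd_none] using hb.symm⟩
  | some b0 =>
    obtain ⟨q, hq⟩ := h b0 rfl
    rw [upd_some] at hb
    by_cases hc : pyLtMat (buildMat k lab col p) b0 = true
    · rw [if_pos hc] at hb; exact ⟨p, by simpa using hb.symm⟩
    · rw [if_neg hc] at hb; exact ⟨q, by rw [hq] at hb; simpa using hb.symm⟩

theorem bestInv_foldl_upd (k : Nat) (lab : List Int) (col : List (List Int)) (pre : List Nat) (L : List (List Nat)) (best : Option (List (List Int)))
    (h : BestInv k lab col best) : BestInv k lab col (L.foldl (fun b p => upd k lab col b (pre ++ p)) best) := by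
  induction L generalizing best with
  | nil => exact h
  | cons p t ih => exact ih _ (bestInv_upd _ _ _ _ _ h)

theorem buildMat_cons (k' : Nat) (lab : List Int) (col : List (List Int)) (p : List Nat) :
    ∃ t r, buildMat (k'+1) lab col p = ((lab.getD (p.getD 0 0) 0) :: t) :: r := by
  unfold buildMat
  rw [List.range_succ_eq_map]
  simp only [List.map_cons]
  exact ⟨_, _, rfl⟩

theorem upd_keep (k' : Nat) (lab : List Int) (col : List (List Int)) (q pp : List Nat) (p0 : Nat)
    (hp0 : pp.getD 0 0 = p0)
    (hgt : ((buildMat (k'+1) lab col q).getD 0 []).getD 0 0 < lab.getD p0 0) :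
    upd (k'+1) lab col (some (buildMat (k'+1) lab col q)) pp = some (buildMat (k'+1) lab col q) := by
  obtain ⟨t1, r1, h1⟩ := buildMat_cons k' lab col pp
  obtain ⟨t2, r2, h2⟩ := buildMat_cons k' lab col q
  rw [h2] at hgt
  simp only [List.getD_cons_zero] at hgt
  have hlt : lab.getD (q.getD 0 0) 0 < lab.getD (pp.getD 0 0) 0 := by rw [hp0]; exact hgt
  rw [h2, upd_some, h1]
  have hrow : pyLtRow (lab.getD (pp.getD 0 0) 0 :: t1) (lab.getD (q.getD 0 0) 0 :: t2) = false := by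
    unfold pyLtRow
    rw [if_neg (by omega), if_neg (by omega)]
  have hmat : pyLtMat ((lab.getD (pp.getD 0 0) 0 :: t1) :: r1) ((lab.getD (q.getD 0 0) 0 :: t2) :: r2) = false := by
    unfold pyLtMat
    rw [hrow, if_neg (by simp), if_neg (by intro h; injection h with h _; omega)]
  rw [hmat]
  simp

theorem perms_zero (xs : List Nat) : PySem.List.permutations xs 0 = [[]] := rfl
theorem perms_succ (xs : List Nat) (r : Nat) : PySem.List.permutations xs (r+1)
    = (List.range xs.length).flatMap (fun i => match xs[i]? with
        | none => [] | some x => (PySem.List.permutations (xs.eraseIdx i) r).map (fun p => x :: p)) := by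
  rw [PySem.List.permutations]
  congr 1
  funext i
  cases xs[i]? <;> simp

theorem dfs_eq (lab : List Int) (col : List (List Int)) (k : Nat) :
    ∀ (r : Nat) (perm rest : List Nat) (best : Option (List (List Int))),
      rest.length = r → perm.length + r = k → BestInv k lab col best →
      dfsGo lab col k r perm rest best
        = (PySem.List.permutations rest r).foldl (fun b p => upd k lab col b (perm ++ p)) best := by
  intro r
  induction r with
  | zero =>
    intro perm rest best _ _ _
    simp only [perms_zero, List.foldl_cons, List.foldl_nil, List.append_nil, dfsGo]
    cases best <;> rfl
  | succ r ih =>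
    intro perm rest best hlen hk hinv
    have hfold : ∀ (l : List Nat) (best : Option (List (List Int))), BestInv k lab col best →
        (∀ i ∈ l, i < rest.length) →
        l.foldl (fun acc i => dfsGo lab col k r (perm ++ [rest.getD i 0]) (rest.eraseIdx i) acc) best
          = l.foldl (fun acc i =>
              ((match rest[i]? with
                | none => ([] : List (List Nat))
                | some x => (PySem.List.permutations (rest.eraseIdx i) r).map (fun p => x :: p))).foldl
                (fun b p => upd k lab col b (perm ++ p)) acc) best := by
      intro l
      induction l with
      | nil => intro best _ _; rfl
      | cons i t iht =>
        intro best hinv' hb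
        simp only [List.foldl_cons]
        have hi : i < rest.length := hb i (by simp)
        have hget : rest[i]? = some rest[i] := List.getElem?_eq_getElem hi
        have hgd : rest.getD i 0 = rest[i] := List.getD_eq_getElem _ _ hi
        have hstep : dfsGo lab col k r (perm ++ [rest.getD i 0]) (rest.eraseIdx i) best
            = ((match rest[i]? with
                | none => ([] : List (List Nat))
                | some x => (PySem.List.permutations (rest.eraseIdx i) r).map (fun p => x :: p))).foldl
                (fun b p => upd k lab col b (perm ++ p)) best := by
          rw [hget]
          have hlen' : (rest.eraseIdx i).length = r := by
            rw [List.length_eraseIdx, if_pos hi]; omega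
          have hk' : (perm ++ [rest.getD i 0]).length + r = k := by
            simp only [List.length_append, List.length_cons, List.length_nil]; omega
          rw [ih (perm ++ [rest.getD i 0]) (rest.eraseIdx i) best hlen' hk' hinv', List.foldl_map]
          apply PySem.List.foldl_congr_mem
          intro b p _
          simp [hget]
        rw [hstep]
        refine iht _ ?_ (fun j hj => hb j (by simp [hj]))
        exact bestInv_foldl_upd k lab col perm _ best hinv'
    have hmem : ∀ i ∈ List.range rest.length, i < rest.length := fun i hi => List.mem_range.mp hi
    cases hbp : best with
    | none =>
      cases perm with
      | nil =>
        rw [show dfsGo lab col k (r+1) [] rest none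
            = (List.range rest.length).foldl
                (fun acc i => dfsGo lab col k r ([] ++ [rest.getD i 0]) (rest.eraseIdx i) acc) none from by
          simp only [dfsGo]; rfl]
        rw [perms_succ, List.foldl_flatMap]
        exact hfold _ none (by intro b h; cases h) hmem
      | cons p0 pt =>
        rw [show dfsGo lab col k (r+1) (p0 :: pt) rest none
            = (List.range rest.length).foldl
                (fun acc i => dfsGo lab col k r ((p0 :: pt) ++ [rest.getD i 0]) (rest.eraseIdx i) acc) none from by
          simp only [dfsGo]; rfl]
        rw [perms_succ, List.foldl_flatMap]
        exact hfold _ none (by intro b h; cases h) hmem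
    | some b =>
      subst hbp
      cases perm with
      | nil =>
        rw [show dfsGo lab col k (r+1) [] rest (some b)
            = (List.range rest.length).foldl
                (fun acc i => dfsGo lab col k r ([] ++ [rest.getD i 0]) (rest.eraseIdx i) acc) (some b) from by
          simp only [dfsGo]; rfl]
        rw [perms_succ, List.foldl_flatMap]
        exact hfold _ (some b) hinv hmem
      | cons p0 pt =>
        by_cases hc : (b.getD 0 []).getD 0 0 < lab.getD p0 0
        · obtain ⟨q, hq⟩ := hinv b rfl
          obtain ⟨k', hk'⟩ : ∃ k', k = k' + 1 := by
            simp only [List.length_cons] at hk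
            exact ⟨k - 1, by omega⟩
          subst hq hk'
          rw [show dfsGo lab col (k'+1) (r+1) (p0 :: pt) rest (some (buildMat (k'+1) lab col q))
              = some (buildMat (k'+1) lab col q) from by
            simp only [dfsGo, decide_eq_true_eq, if_pos hc]]
          refine (foldl_fixed (fun b p => upd (k'+1) lab col b ((p0 :: pt) ++ p))
            (some (buildMat (k'+1) lab col q)) (PySem.List.permutations rest (r+1)) ?_).symm
          intro p _
          exact upd_keep k' lab col q ((p0 :: pt) ++ p) p0 rfl hc
        · rw [show dfsGo lab col k (r+1) (p0 :: pt) rest (some b)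
              = (List.range rest.length).foldl
                  (fun acc i => dfsGo lab col k r ((p0 :: pt) ++ [rest.getD i 0]) (rest.eraseIdx i) acc) (some b) from by
            simp only [dfsGo, decide_eq_true_eq, if_neg hc]]
          rw [perms_succ, List.foldl_flatMap]
          exact hfold _ (some b) hinv hmem

theorem subNode_getD (k : Nat) (sl : List Int) (nd : PySem.Dict Int Int) (m : Nat) (hm : m < k) :
    ((List.range k).foldl (fun d i => d.insert i (nd.getD (sl.getD i 0) 1)) PySem.Dict.empty).getD m 1
      = nd.getD (sl.getD m 0) 1 := by
  apply PySem.Dict.getD_of_mem_items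
  · rw [PySem.Dict.items_foldl_insert_fresh (List.range k) (fun i => i)
      (fun i => nd.getD (sl.getD i 0) 1) PySem.Dict.empty (by simp) (by simpa using List.nodup_range)]
    exact List.mem_append_right _ (List.mem_map.mpr ⟨m, List.mem_range.mpr hm, rfl⟩)
  · exact PySem.Dict.nodup_keys_foldl_insert _ _ _ PySem.Dict.nodup_keys_empty

theorem subEdge_getD (k : Nat) (sl : List Int) (ed : PySem.Dict (Int × Int) Int) (a b : Nat) (hab : a < b) (hb : b < k) :
    ((List.range k).foldl (fun d i =>
        (List.range' (i+1) (k - (i+1))).foldl (fun d j =>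
          if 0 < ed.getD (min (sl.getD i 0) (sl.getD j 0), max (sl.getD i 0) (sl.getD j 0)) 0
          then d.insert (i, j) (ed.getD (min (sl.getD i 0) (sl.getD j 0), max (sl.getD i 0) (sl.getD j 0)) 0)
          else d) d) PySem.Dict.empty).getD (a, b) 0
      = (if 0 < ed.getD (min (sl.getD a 0) (sl.getD b 0), max (sl.getD a 0) (sl.getD b 0)) 0
         then ed.getD (min (sl.getD a 0) (sl.getD b 0), max (sl.getD a 0) (sl.getD b 0)) 0 else 0) := by
  set C : Nat → Nat → Int := fun i j => ed.getD (min (sl.getD i 0) (sl.getD j 0), max (sl.getD i 0) (sl.getD j 0)) 0 with hC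
  set P : List (Nat × Nat) := (List.range k).flatMap (fun i =>
      ((List.range' (i+1) (k - (i+1))).filter (fun j => decide (0 < C i j))).map (fun j => (i, j))) with hP
  have h2 : ((List.range k).foldl (fun d i =>
        (List.range' (i+1) (k - (i+1))).foldl (fun d j =>
          if 0 < C i j then d.insert (i, j) (C i j) else d) d) PySem.Dict.empty)
      = P.foldl (fun d q => d.insert q (C q.1 q.2)) PySem.Dict.empty := by
    rw [hP, List.foldl_flatMap]
    apply PySem.List.foldl_congr_mem
    intro d i _
    rw [PySem.List.foldl_ite_eq_foldl_filter, List.foldl_map]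
  rw [h2]
  have hPnodup : P.Nodup := by
    rw [hP, List.nodup_flatMap]
    constructor
    · intro i _
      exact List.Nodup.map (fun x y h => by injection h) (List.Nodup.filter _ (List.nodup_range' 1))
    · apply List.Pairwise.imp ?_ (List.nodup_range (n := k))
      intro i j hij
      intro q hq hq'
      simp only [List.mem_map, List.mem_filter] at hq hq'
      obtain ⟨x, _, rfl⟩ := hq
      obtain ⟨y, _, h⟩ := hq'
      exact hij ((congrArg Prod.fst h).symm)
  have hkeysnd : (P.foldl (fun d q => d.insert q (C q.1 q.2)) PySem.Dict.empty).keys.Nodup :=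
    PySem.Dict.nodup_keys_foldl_insert _ _ _ PySem.Dict.nodup_keys_empty
  have hitems : (P.foldl (fun d q => d.insert q (C q.1 q.2)) PySem.Dict.empty).items
      = P.map (fun q => (q, C q.1 q.2)) := by
    rw [PySem.Dict.items_foldl_insert_fresh P (fun q => q) (fun q => C q.1 q.2) PySem.Dict.empty
      (by simp) (by simpa using hPnodup)]
    rfl
  have hmemP : ∀ x y : Nat, (x, y) ∈ P ↔ (x < k ∧ x + 1 ≤ y ∧ y < x + 1 + (k - (x+1)) ∧ 0 < C x y) := by
    intro x y
    rw [hP]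
    simp only [List.mem_flatMap, List.mem_map, List.mem_filter, List.mem_range, List.mem_range'_1]
    constructor
    · rintro ⟨i, hi, j, ⟨⟨hj1, hj2⟩, hj3⟩, hxy⟩
      injection hxy with e1 e2
      subst e1; subst e2
      exact ⟨hi, hj1, hj2, by simpa using hj3⟩
    · rintro ⟨h1, h2, h3, h4⟩
      exact ⟨x, h1, y, ⟨⟨h2, h3⟩, by simpa using h4⟩, rfl⟩
  by_cases hc : 0 < C a b
  · rw [if_pos hc]
    apply PySem.Dict.getD_of_mem_items _ _ hkeysnd
    rw [hitems]
    exact List.mem_map.mpr ⟨(a, b), (hmemP a b).mpr ⟨by omega, by omega, by omega, hc⟩, rfl⟩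
  · rw [if_neg hc]
    apply PySem.Dict.getD_of_not_contains
    have hk : (P.foldl (fun d q => d.insert q (C q.1 q.2)) PySem.Dict.empty).keys = P := by
      unfold PySem.Dict.keys
      rw [hitems, List.map_map,
        show ((fun (x : (Nat × Nat) × Int) => x.1) ∘ fun q => (q, C q.1 q.2)) = id from funext fun q => rfl,
        List.map_id]
    rw [PySem.Dict.contains_eq_decide_mem_keys, hk]
    simp only [decide_eq_false_iff_not]
    intro hmem
    exact hc ((hmemP a b).mp hmem).2.2.2

theorem getD_map_lt {α β : Type} (f : α → β) (l : List α) (n : Nat) (d : β) (d' : α) (h : n < l.length) :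
    (l.map f).getD n d = f (l.getD n d') := by
  rw [List.getD_eq_getElem _ _ (by simpa using h), List.getElem_map, List.getD_eq_getElem _ _ h]

theorem makeAdj_eq_buildMat (k : Nat) (sl : List Int) (nd : PySem.Dict Int Int) (ed : PySem.Dict (Int × Int) Int)
    (hsl : sl.length = k) (p : List Nat) (hp : p.Perm (List.range k)) :
    makeAdj k ((List.range k).foldl (fun d i => d.insert i (nd.getD (sl.getD i 0) 1)) PySem.Dict.empty)
      ((List.range k).foldl (fun d i =>
        (List.range' (i+1) (k - (i+1))).foldl (fun d j =>
          if 0 < ed.getD (min (sl.getD i 0) (sl.getD j 0), max (sl.getD i 0) (sl.getD j 0)) 0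
          then d.insert (i, j) (ed.getD (min (sl.getD i 0) (sl.getD j 0), max (sl.getD i 0) (sl.getD j 0)) 0)
          else d) d) PySem.Dict.empty) p
    = buildMat k (sl.map (fun v => nd.getD v 1)) (sl.map (fun u => sl.map (fun v => colval ed u v))) p := by
  have hpl : p.length = k := hp.length_eq.trans (List.length_range)
  have hnd : p.Nodup := (hp.nodup_iff).mpr (List.nodup_range)
  have hbound : ∀ m ∈ p, m < k := fun m hm => List.mem_range.mp (hp.mem_iff.mp hm)
  unfold makeAdj buildMat
  apply List.map_congr_left
  intro i hi
  apply List.map_congr_left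
  intro j hj
  have hik : i < k := List.mem_range.mp hi
  have hjk : j < k := List.mem_range.mp hj
  have hpi : p.getD i 0 = p[i]'(by omega) := List.getD_eq_getElem _ _ (by omega)
  have hpj : p.getD j 0 = p[j]'(by omega) := List.getD_eq_getElem _ _ (by omega)
  have hpik : p.getD i 0 < k := hbound _ (hpi ▸ List.getElem_mem _)
  have hpjk : p.getD j 0 < k := hbound _ (hpj ▸ List.getElem_mem _)
  by_cases hij : i = j
  · rw [if_pos hij, if_pos hij, subNode_getD k sl nd _ hpik,
      getD_map_lt (fun v => nd.getD v 1) sl _ 0 0 (by omega)]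
  · rw [if_neg hij, if_neg hij]
    dsimp only
    have hne : p.getD i 0 ≠ p.getD j 0 := by
      rw [hpi, hpj]
      intro h
      exact hij (hnd.getElem_inj_iff.mp h)
    -- abbreviations
    set pi := p.getD i 0
    set pj := p.getD j 0
    have hcol : ((sl.map (fun u => sl.map (fun v => colval ed u v))).getD pi []).getD pj 0
        = colval ed (sl.getD pi 0) (sl.getD pj 0) := by
      rw [getD_map_lt (fun u => sl.map (fun v => colval ed u v)) sl pi [] 0 (by omega),
        getD_map_lt _ sl pj 0 0 (by omega)]
    rw [hcol]
    rcases Nat.lt_or_ge pi pj with hlt | hge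
    · rw [show min pi pj = pi from by omega, show max pi pj = pj from by omega,
        subEdge_getD k sl ed pi pj hlt hpjk]
      unfold colval
      rfl
    · have hlt : pj < pi := by omega
      rw [show min pi pj = pj from by omega, show max pi pj = pi from by omega,
        subEdge_getD k sl ed pj pi hlt hpik]
      unfold colval
      rw [min_comm, max_comm]

-- ===== VERDICT (by name: the statement is the Claim_ definition above) =====
theorem induced_sub_canonical_node_edge_spec : Claim_equal_induced_sub_canonical_node_edge := by
  unfold Claim_equal_induced_sub_canonical_node_edge
  intro n_global node_labels edge_labels subset _
  unfold Spec_induced_sub_canonical_node_edge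
  unfold induced_sub_canonical_node_edge induced_sub_canonical_node_edge_alt
  simp only []
  unfold canonical_labeled_graph_node_edge
  set k := subset.length
  set sl := PySem.List.sorted subset (fun x => x) false with hslv
  set nd : PySem.Dict Int Int := PySem.Dict.ofList node_labels
  set ed : PySem.Dict (Int × Int) Int := PySem.Dict.ofList (edge_labels.map (fun t => ((t.1, t.2.1), t.2.2)))
  have hsl : sl.length = k := PySem.List.length_sorted subset _ _
  set lab := sl.map (fun v => nd.getD v 1)
  set col := sl.map (fun u => sl.map (fun v => colval ed u v))
  have hdfs := dfs_eq lab col k k [] (List.range k) none (List.length_range) (by simp)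
    (by intro b h; cases h)
  rw [hdfs]
  congr 1
  have hperm : ∀ p ∈ PySem.List.permutations (List.range k) k, p.Perm (List.range k) := by
    intro p hpmem
    apply PySem.List.perm_of_mem_permutations
    rwa [List.length_range]
  apply PySem.List.foldl_congr_mem
  intro best p hpmem
  have hmab := makeAdj_eq_buildMat k sl nd ed hsl p (hperm p hpmem)
  cases best with
  | none => simp only [upd, List.nil_append, hmab]; rfl
  | some b => simp only [upd, List.nil_append, hmab]; rfl
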